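-- pv_equiv track=rewrite | github.com/tlxx22/shangjijiance | src/custom_tools.py | _unescape_control_chars_outside_strings
-- ===== SOURCE A (Python) =====
-- def _unescape_control_chars_outside_strings(text: str) -> str:
-- 	"""
-- 	LLM/Agent 有时会把换行写成字面量 "\\n"（以及 "\\t"/"\\r"），导致整体不再是合法 JSON/YAML。
--
-- 	此函数只在 *非字符串上下文* 下把这些转义序列还原为真实空白字符，
-- 	避免把字符串值里的 "\\n" 变成真实换行从而破坏 JSON。
-- 	"""
-- 	out: list[str] = []
-- 	in_string = False
-- 	escape = False
-- 	i = 0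
-- 	while i < len(text):
-- 		ch = text[i]
--
-- 		if in_string:
-- 			out.append(ch)
-- 			if escape:
-- 				escape = False
-- 			else:
-- 				if ch == "\\":
-- 					escape = True
-- 				elif ch == '"':
-- 					in_string = False
-- 			i += 1
-- 			continue
--
-- 		# 非字符串上下文
-- 		if ch == '"':
-- 			in_string = True
-- 			out.append(ch)
-- 			i += 1
-- 			continue
--
-- 		# 处理 \\n/\\r/\\t（仅限非字符串）
-- 		if ch == "\\" and i + 1 < len(text):
-- 			nxt = text[i + 1]
-- 			if nxt == "n":
-- 				out.append("\n")
-- 				i += 2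
-- 				continue
-- 			if nxt == "r":
-- 				out.append("\r")
-- 				i += 2
-- 				continue
-- 			if nxt == "t":
-- 				out.append("\t")
-- 				i += 2
-- 				continue
--
-- 		out.append(ch)
-- 		i += 1
--
-- 	return "".join(out)
-- ===== SOURCE B (Python) =====
-- def _unescape_control_chars_outside_strings(text: str) -> str:
-- 	"""Split on the quote character and bulk-replace escapes only in the outside-string pieces."""
-- 	pieces = text.split('"')
-- 	out = []
-- 	in_string = False
-- 	for k, piece in enumerate(pieces):
-- 		if k:
-- 			out.append('"')
-- 		if in_string:
-- 			out.append(piece)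
-- 			if (len(piece) - len(piece.rstrip('\\'))) % 2 == 0:
-- 				in_string = False
-- 		else:
-- 			out.append(piece.replace('\\n', '\n').replace('\\r', '\r').replace('\\t', '\t'))
-- 			in_string = True
-- 	return ''.join(out)
-- ===== Notes on version B (the rewrite author's own statement) =====
-- stated objective: faster
-- what changed: Replaces the char-by-char state machine (in_string/escape flags, manual index) with a split on the double-quote character into alternating outside/inside pieces, bulk str.replace of the backslash-n/r/t escapes on outside pieces, and a trailing-backslash parity test to decide whether each quote closes a string.
import Mathlib
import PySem

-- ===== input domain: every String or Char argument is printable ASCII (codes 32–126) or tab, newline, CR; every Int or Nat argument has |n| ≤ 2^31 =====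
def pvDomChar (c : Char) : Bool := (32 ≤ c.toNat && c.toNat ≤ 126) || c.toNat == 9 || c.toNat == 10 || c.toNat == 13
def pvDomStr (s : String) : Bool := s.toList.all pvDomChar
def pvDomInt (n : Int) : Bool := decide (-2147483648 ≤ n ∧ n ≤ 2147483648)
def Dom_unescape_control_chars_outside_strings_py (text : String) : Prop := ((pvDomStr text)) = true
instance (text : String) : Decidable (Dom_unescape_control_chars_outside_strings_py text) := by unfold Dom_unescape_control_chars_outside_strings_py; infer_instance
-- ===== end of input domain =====

-- B replaces A's per-character state machine by split-on-quote + bulk replaces; proved equal on all inputs.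

-- ===== PORT A =====
-- the while loop of A: state (in_string, escape), out accumulated left to right ("".join(out) = the list itself)
def pyAgo : List Char → Bool → Bool → List Char → List Char
  | [], _, _, out => out
  | ch :: rest, in_string, escape, out =>
    if in_string then
      if escape then pyAgo rest true false (out ++ [ch])
      else if ch = '\\' then pyAgo rest true true (out ++ [ch])
      else if ch = '"' then pyAgo rest false false (out ++ [ch])
      else pyAgo rest true false (out ++ [ch])
    else if ch = '"' then pyAgo rest true false (out ++ [ch])
    else if ch = '\\' then
      match rest with
      | nxt :: rest2 =>
        if nxt = 'n' then pyAgo rest2 false false (out ++ ['\n'])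
        else if nxt = 'r' then pyAgo rest2 false false (out ++ ['\r'])
        else if nxt = 't' then pyAgo rest2 false false (out ++ ['\t'])
        else pyAgo (nxt :: rest2) false false (out ++ [ch])
      | [] => pyAgo [] false false (out ++ [ch])
    else pyAgo rest false false (out ++ [ch])

def unescape_control_chars_outside_strings_py (text : String) : String :=
  String.ofList (pyAgo text.toList false false [])

-- ===== PORT B =====
-- piece.replace('\\n','\n').replace('\\r','\r').replace('\\t','\t')
def pyBpiece (p : List Char) : List Char :=
  PySem.Chars.replace (PySem.Chars.replace (PySem.Chars.replace p ['\\', 'n'] ['\n']) ['\\', 'r'] ['\r']) ['\\', 't'] ['\t']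

-- piece.rstrip('\\') : hand port (PySem's rstrip is whitespace-only); exact: drops exactly the trailing backslashes
def pyBrstrip (p : List Char) : List Char := (p.reverse.dropWhile (· == '\\')).reverse

-- the enumerate loop of B; out kept flat ("".join over appended pieces = concatenation)
def pyBloop : List (List Char) → Nat → Bool → List Char → List Char
  | [], _, _, out => out
  | piece :: ps, k, in_string, out =>
    if in_string then
      if (piece.length - (pyBrstrip piece).length) % 2 == 0 then
        pyBloop ps (k + 1) false ((if k ≠ 0 then out ++ ['"'] else out) ++ piece)
      else
        pyBloop ps (k + 1) true ((if k ≠ 0 then out ++ ['"'] else out) ++ piece)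
    else
      pyBloop ps (k + 1) true ((if k ≠ 0 then out ++ ['"'] else out) ++ pyBpiece piece)

def unescape_control_chars_outside_strings_py_alt (text : String) : String :=
  String.ofList (pyBloop (PySem.Chars.splitOn text.toList ['"']) 0 false [])

-- ===== PRECONDITION & SPEC =====
def Spec_unescape_control_chars_outside_strings_py (text : String) (out : String) : Prop := out = unescape_control_chars_outside_strings_py_alt text
instance (text : String) (out : String) : Decidable (Spec_unescape_control_chars_outside_strings_py text out) := by unfold Spec_unescape_control_chars_outside_strings_py; infer_instance

-- ===== CLAIM (what is proved, stated in full; the proofs are below) =====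
def Claim_equal_unescape_control_chars_outside_strings_py : Prop := ∀ (text : String), Dom_unescape_control_chars_outside_strings_py text → Spec_unescape_control_chars_outside_strings_py text (unescape_control_chars_outside_strings_py text)

-- ===== LEMMAS AND PROOFS =====

-- ===== LEMMAS AND PROOFS =====

-- accumulator-free version of A's loop: outside-string / inside-string halves
mutual
def specOut : List Char → List Char
  | [] => []
  | ch :: rest =>
    if ch = '"' then ch :: specIn rest false
    else if ch = '\\' then
      match rest with
      | nxt :: rest2 =>
        if nxt = 'n' then '\n' :: specOut rest2
        else if nxt = 'r' then '\r' :: specOut rest2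
        else if nxt = 't' then '\t' :: specOut rest2
        else ch :: specOut (nxt :: rest2)
      | [] => [ch]
    else ch :: specOut rest

def specIn : List Char → Bool → List Char
  | [], _ => []
  | ch :: rest, escape =>
    if escape then ch :: specIn rest false
    else if ch = '\\' then ch :: specIn rest true
    else if ch = '"' then ch :: specOut rest
    else ch :: specIn rest false
end

-- one simultaneous pass replacing \n/\r/\t (A's outside-string behaviour on quote-free text)
def simul : List Char → List Char
  | [] => []
  | c :: rest =>
    if c = '\\' then
      match rest with
      | nxt :: rest2 =>
        if nxt = 'n' then '\n' :: simul rest2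
        else if nxt = 'r' then '\r' :: simul rest2
        else if nxt = 't' then '\t' :: simul rest2
        else c :: simul (nxt :: rest2)
      | [] => [c]
    else c :: simul rest

-- structural form of str.replace for a 2-char pattern and 1-char replacement
def repl2 (b y : Char) : List Char → List Char
  | [] => []
  | [c] => [c]
  | c :: d :: t => if c = '\\' ∧ d = b then y :: repl2 b y t else c :: repl2 b y (d :: t)

def chain3 (p : List Char) : List Char :=
  repl2 't' '\t' (repl2 'r' '\r' (repl2 'n' '\n' p))

-- structural form of text.split('"')
def mySplit : List Char → List Char → List (List Char)
  | [], cur => [cur.reverse]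
  | c :: r, cur => if c = '"' then cur.reverse :: mySplit r [] else mySplit r (c :: cur)

-- escape flag after scanning a quote-free piece inside a string
def escStep (e : Bool) (c : Char) : Bool := if e then false else decide (c = '\\')
def escAfter (e : Bool) (p : List Char) : Bool := p.foldl escStep e

-- expected output per piece list (first piece outside / inside according to the flag)
def gPieces : List (List Char) → Bool → List Char
  | [], _ => []
  | [p], false => chain3 p
  | [p], true => p
  | p :: ps, false => chain3 p ++ '"' :: gPieces ps true
  | p :: ps, true => p ++ '"' :: gPieces ps (escAfter false p)

-- quote-prefixed continuation (what pyBloop produces for the non-first pieces)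
def qList : List (List Char) → Bool → List Char
  | [], _ => []
  | p :: ps, true => '"' :: (p ++ qList ps (escAfter false p))
  | p :: ps, false => '"' :: (chain3 p ++ qList ps true)

theorem specOut_nil : specOut [] = [] := by rw [specOut.eq_def]
theorem specIn_nil (e : Bool) : specIn [] e = [] := by rw [specIn.eq_def]
theorem specOut_cons (ch : Char) (rest : List Char) : specOut (ch :: rest) =
    (if ch = '"' then ch :: specIn rest false
    else if ch = '\\' then
      match rest with
      | nxt :: rest2 =>
        if nxt = 'n' then '\n' :: specOut rest2
        else if nxt = 'r' then '\r' :: specOut rest2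
        else if nxt = 't' then '\t' :: specOut rest2
        else ch :: specOut (nxt :: rest2)
      | [] => [ch]
    else ch :: specOut rest) := by rw [specOut.eq_def]
theorem specIn_cons (ch : Char) (rest : List Char) (escape : Bool) : specIn (ch :: rest) escape =
    (if escape then ch :: specIn rest false
    else if ch = '\\' then ch :: specIn rest true
    else if ch = '"' then ch :: specOut rest
    else ch :: specIn rest false) := by rw [specIn.eq_def]

theorem pyAgo_eq_spec (cs : List Char) (ins esc : Bool) (out : List Char) :
    pyAgo cs ins esc out = out ++ (if ins then specIn cs esc else specOut cs) := by
  fun_induction pyAgo cs ins esc out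
  all_goals try simp_all [specOut_nil, specIn_nil, specIn_cons, List.append_assoc]
  all_goals conv_rhs => rw [specOut_cons]
  all_goals simp_all [List.append_assoc]
theorem replace_go_repl2 (b y : Char) (fuel : Nat) (l acc : List Char) (h : l.length ≤ fuel) :
    PySem.Chars.replace.go ['\\', b] [y] fuel l acc = acc.reverse ++ repl2 b y l := by
  induction fuel generalizing l acc with
  | zero =>
    have : l = [] := by cases l <;> simp_all
    subst this
    rw [PySem.Chars.replace.go.eq_def]
    simp [repl2]
  | succ n ih =>
    cases l with
    | nil => rw [PySem.Chars.replace.go.eq_def]; simp [repl2]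
    | cons c t =>
      rw [PySem.Chars.replace.go.eq_def]
      cases t with
      | nil =>
        have : List.isPrefixOf ['\\', b] [c] = false := by simp [List.isPrefixOf]
        simp only [this, Bool.false_eq_true, if_neg]
        rw [ih [] (c :: acc) (by simp)]
        simp [repl2]
      | cons d t2 =>
        by_cases hp : c = '\\' ∧ d = b
        · have : List.isPrefixOf ['\\', b] (c :: d :: t2) = true := by
            simp [List.isPrefixOf, hp.1, hp.2]
          simp only [this, if_pos]
          rw [ih _ _ (by simp at h ⊢; omega)]
          simp [repl2, hp]
        · have : List.isPrefixOf ['\\', b] (c :: d :: t2) = false := by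
            simp [List.isPrefixOf]
            intro h1 h2; exact absurd ⟨h1.symm, h2.symm⟩ hp
          simp only [this, Bool.false_eq_true, if_neg]
          rw [ih (d :: t2) (c :: acc) (by simp at h ⊢; omega)]
          simp [repl2, hp]

theorem repl2_eq_replace (b y : Char) (l : List Char) :
    PySem.Chars.replace l ['\\', b] [y] = repl2 b y l := by
  rw [PySem.Chars.replace]
  simp only [List.isEmpty_cons, Bool.false_eq_true, if_neg]
  exact replace_go_repl2 b y l.length l [] (le_refl _)
theorem splitOn_go_mySplit (fuel : Nat) (l cur : List Char) (acc : List (List Char)) (h : l.length ≤ fuel) :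
    PySem.Chars.splitOn.go ['"'] fuel l cur acc = acc.reverse ++ mySplit l cur := by
  induction fuel generalizing l cur acc with
  | zero =>
    have : l = [] := by cases l <;> simp_all
    subst this
    rw [PySem.Chars.splitOn.go.eq_def]
    simp [mySplit]
  | succ n ih =>
    cases l with
    | nil => rw [PySem.Chars.splitOn.go.eq_def]; simp [mySplit]
    | cons c t =>
      rw [PySem.Chars.splitOn.go.eq_def]
      by_cases hc : c = '"'
      · have : List.isPrefixOf ['"'] (c :: t) = true := by simp [List.isPrefixOf, hc]
        simp only [this, if_pos, List.length_cons, List.length_nil, List.drop_succ_cons, List.drop_zero]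
        rw [ih t [] (List.reverse cur :: acc) (by simp at h ⊢; omega)]
        simp [mySplit, hc]
      · have : List.isPrefixOf ['"'] (c :: t) = false := by simp [List.isPrefixOf]; exact fun h => absurd h.symm hc
        simp only [this, Bool.false_eq_true, if_neg]
        rw [ih t (c :: cur) acc (by simp at h ⊢; omega)]
        simp [mySplit, hc]

theorem splitOn_eq_mySplit (l : List Char) :
    PySem.Chars.splitOn l ['"'] = mySplit l [] := by
  rw [PySem.Chars.splitOn]
  exact splitOn_go_mySplit (l.length + 1) l [] [] (by omega)
theorem repl2_nil (b y : Char) : repl2 b y [] = [] := by simp [repl2]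
theorem repl2_single (b y c : Char) : repl2 b y [c] = [c] := by simp [repl2]
theorem repl2_cons_ne (b y c : Char) (hx : c ≠ '\\') (l : List Char) :
    repl2 b y (c :: l) = c :: repl2 b y l := by cases l <;> simp [repl2, hx]
theorem repl2_bs_ne (b y d : Char) (hd : d ≠ b) (l : List Char) :
    repl2 b y ('\\' :: d :: l) = '\\' :: repl2 b y (d :: l) := by
  simp [repl2]; intro h; exact absurd h hd
theorem repl2_bs_hit (b y : Char) (l : List Char) : repl2 b y ('\\' :: b :: l) = y :: repl2 b y l := by
  simp [repl2]
theorem repl2_bs_safe (b y : Char) (Y : List Char) (h : Y.head? ≠ some b) :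
    repl2 b y ('\\' :: Y) = '\\' :: repl2 b y Y := by
  cases Y with
  | nil => simp [repl2]
  | cons c z =>
    have : c ≠ b := by simp at h; exact h
    rw [repl2_bs_ne b y c this]

theorem replN_bs_head (q : List Char) :
    (repl2 'n' '\n' ('\\' :: q)).head? = some '\\' ∨ (repl2 'n' '\n' ('\\' :: q)).head? = some '\n' := by
  cases q with
  | nil => left; simp [repl2]
  | cons c z =>
    by_cases hc : c = 'n'
    · right; subst hc; rw [repl2_bs_hit]; simp
    · left; rw [repl2_bs_ne _ _ _ hc]; simp

theorem replR_head (X : List Char) (h : X.head? = some '\\' ∨ X.head? = some '\n') :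
    (repl2 'r' '\r' X).head? = some '\\' ∨ (repl2 'r' '\r' X).head? = some '\r' ∨
    (repl2 'r' '\r' X).head? = some '\n' := by
  cases X with
  | nil => simp at h
  | cons c z =>
    simp at h
    rcases h with h | h <;> subst h
    · cases z with
      | nil => left; simp [repl2]
      | cons d z2 =>
        by_cases hd : d = 'r'
        · right; left; subst hd; rw [repl2_bs_hit]; simp
        · left; rw [repl2_bs_ne _ _ _ hd]; simp
    · right; right; rw [repl2_cons_ne _ _ _ (by decide)]; simp

theorem chain3_bs_bs (q : List Char) : chain3 ('\\' :: '\\' :: q) = '\\' :: chain3 ('\\' :: q) := by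
  unfold chain3
  rw [repl2_bs_ne 'n' '\n' '\\' (by decide)]
  have h1 := replN_bs_head q
  rw [repl2_bs_safe 'r' '\r' _ (by rcases h1 with h | h <;> simp [h] <;> decide)]
  have h2 := replR_head _ h1
  rw [repl2_bs_safe 't' '\t' _ (by rcases h2 with h | h | h <;> simp [h] <;> decide)]
theorem chain3_cons_ne (c : Char) (hc : c ≠ '\\') (l : List Char) :
    chain3 (c :: l) = c :: chain3 l := by
  unfold chain3
  rw [repl2_cons_ne 'n' '\n' c hc, repl2_cons_ne 'r' '\r' c hc, repl2_cons_ne 't' '\t' c hc]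

theorem chain3_eq_simul (p : List Char) : chain3 p = simul p := by
  fun_induction simul p with
  | case1 => simp [chain3, repl2_nil]
  | case2 rest2 ih =>
    unfold chain3
    rw [repl2_bs_hit, repl2_cons_ne 'r' '\r' '\n' (by decide), repl2_cons_ne 't' '\t' '\n' (by decide)]
    exact congrArg _ ih
  | case3 rest2 h ih =>
    unfold chain3
    rw [repl2_bs_ne 'n' '\n' 'r' (by decide), repl2_cons_ne 'n' '\n' 'r' (by decide),
        repl2_bs_hit, repl2_cons_ne 't' '\t' '\r' (by decide)]
    exact congrArg _ ih
  | case4 rest2 h1 h2 ih =>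
    unfold chain3
    rw [repl2_bs_ne 'n' '\n' 't' (by decide), repl2_cons_ne 'n' '\n' 't' (by decide),
        repl2_bs_ne 'r' '\r' 't' (by decide), repl2_cons_ne 'r' '\r' 't' (by decide),
        repl2_bs_hit]
    exact congrArg _ ih
  | case5 nxt rest2 hn hr ht ih =>
    by_cases hb : nxt = '\\'
    · subst hb
      rw [chain3_bs_bs, ih]
    · unfold chain3
      rw [repl2_bs_ne 'n' '\n' nxt hn, repl2_cons_ne 'n' '\n' nxt hb,
          repl2_bs_ne 'r' '\r' nxt hr, repl2_cons_ne 'r' '\r' nxt hb,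
          repl2_bs_ne 't' '\t' nxt ht, repl2_cons_ne 't' '\t' nxt hb]
      have h2 := ih
      rw [chain3_cons_ne nxt hb] at h2
      unfold chain3 at h2
      rw [h2]
  | case6 => simp [chain3, repl2_single]
  | case7 ch rest h ih => rw [chain3_cons_ne ch h, ih]
theorem escAfter_cons (e : Bool) (c : Char) (p : List Char) :
    escAfter e (c :: p) = escAfter (escStep e c) p := rfl

theorem specOut_append (p tail : List Char) (hq : '"' ∉ p)
    (ht : tail = [] ∨ ∃ r, tail = '"' :: r) :
    specOut (p ++ tail) = simul p ++ specOut tail := by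
  fun_induction simul p with
  | case1 => simp
  | case2 rest2 ih =>
    rw [List.cons_append, List.cons_append, specOut_cons]
    simp only [if_neg (by decide : ¬('\\' : Char) = '"'), if_pos rfl, if_pos rfl]
    rw [ih (by simp_all)]
    simp
  | case3 rest2 h ih =>
    rw [List.cons_append, List.cons_append, specOut_cons]
    simp only [if_neg (by decide : ¬('\\' : Char) = '"'), if_pos rfl,
      if_neg (by decide : ¬('r' : Char) = 'n'), if_pos rfl]
    rw [ih (by simp_all)]
    simp
  | case4 rest2 h1 h2 ih =>
    rw [List.cons_append, List.cons_append, specOut_cons]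
    simp only [if_neg (by decide : ¬('\\' : Char) = '"'), if_pos rfl,
      if_neg (by decide : ¬('t' : Char) = 'n'), if_neg (by decide : ¬('t' : Char) = 'r'), if_pos rfl]
    rw [ih (by simp_all)]
    simp
  | case5 nxt rest2 hn hr ht2 ih =>
    rw [List.cons_append, List.cons_append, specOut_cons]
    simp only [if_neg (by decide : ¬('\\' : Char) = '"'), if_pos rfl, if_neg hn, if_neg hr, if_neg ht2]
    rw [← List.cons_append, ih (by simp_all)]
    simp [simul, hn, hr, ht2]
  | case6 =>
    rcases ht with h | ⟨r, h⟩ <;> subst h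
    · simp [specOut_cons, specIn_nil, simul, specOut_nil]
    · rw [List.singleton_append, specOut_cons]
      simp [simul, specOut_nil]
  | case7 ch rest h ih =>
    have hch : ch ≠ '"' := by rintro rfl; simp at hq
    rw [List.cons_append, specOut_cons]
    simp only [if_neg hch, if_neg h]
    rw [ih (by simp_all)]
    simp

theorem specIn_append (p tail : List Char) (hq : '"' ∉ p) (e : Bool) :
    specIn (p ++ tail) e = p ++ specIn tail (escAfter e p) := by
  induction p generalizing e with
  | nil => simp [escAfter]
  | cons c p' ih =>
    have hc : ¬c = '"' := by rintro rfl; simp at hq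
    have hq' : '"' ∉ p' := by simp at hq; exact hq.2
    rw [List.cons_append, specIn_cons, escAfter_cons]
    cases e with
    | true =>
      simp only [if_pos rfl]
      rw [ih hq']
      simp [escStep]
    | false =>
      simp only [Bool.false_eq_true, if_neg (by simp : ¬False)]
      by_cases hb : c = '\\'
      · subst hb
        simp only [if_pos rfl]
        rw [ih hq']
        simp [escStep]
      · simp only [if_neg hb, if_neg hc]
        rw [ih hq']
        simp [escStep, hb]

theorem mySplit_ne_nil (cs cur : List Char) : mySplit cs cur ≠ [] := by
  induction cs generalizing cur with
  | nil => simp [mySplit]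
  | cons c r ih => by_cases h : c = '"' <;> simp [mySplit, h, ih]

def reasm : List (List Char) → List Char
  | [] => []
  | [p] => p
  | p :: ps => p ++ '"' :: reasm ps

theorem reasm_mySplit (cs cur : List Char) : reasm (mySplit cs cur) = cur.reverse ++ cs := by
  induction cs generalizing cur with
  | nil => simp [mySplit, reasm]
  | cons c r ih =>
    by_cases h : c = '"'
    · subst h
      simp only [mySplit, if_pos trivial]
      have h2 := ih ([] : List Char)
      cases hsp : mySplit r [] with
      | nil => exact absurd hsp (mySplit_ne_nil r [])
      | cons q qs =>
        rw [hsp] at h2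
        simp only [List.reverse_nil, List.nil_append] at h2
        simp only [reasm]
        rw [h2]
    · simp only [mySplit, if_neg h]
      rw [ih]
      simp
theorem mySplit_noquote (cs cur : List Char) (hc : '"' ∉ cur) :
    ∀ p ∈ mySplit cs cur, '"' ∉ p := by
  induction cs generalizing cur with
  | nil =>
    intro p hp
    simp [mySplit] at hp
    subst hp
    simp_all
  | cons c r ih =>
    by_cases h : c = '"'
    · subst h
      intro p hp
      simp only [mySplit, if_pos trivial] at hp
      rcases List.mem_cons.mp hp with h1 | h1
      · subst h1; simp_all
      · exact ih [] (by simp) p h1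
    · intro p hp
      simp only [mySplit, if_neg h] at hp
      exact ih (c :: cur) (by simp_all; exact fun hh => absurd hh.symm h) p hp

theorem spec_reasm (ps : List (List Char)) (hne : ps ≠ []) (hq : ∀ p ∈ ps, '"' ∉ p) :
    specOut (reasm ps) = gPieces ps false ∧
    specIn (reasm ps) false = gPieces ps true := by
  induction ps with
  | nil => exact absurd rfl hne
  | cons p ps ih =>
    have hqp : '"' ∉ p := hq p (by simp)
    cases ps with
    | nil =>
      constructor
      · have h1 := specOut_append p [] hqp (Or.inl rfl)
        simp only [List.append_nil] at h1
        rw [reasm, h1, specOut_nil]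
        simp [gPieces, chain3_eq_simul]
      · have h1 := specIn_append p [] hqp false
        simp only [List.append_nil] at h1
        rw [reasm, h1, specIn_nil]
        simp [gPieces]
    | cons q qs =>
      have ihh := ih (List.cons_ne_nil q qs) (fun x hx => hq x (List.mem_cons_of_mem p hx))
      constructor
      · rw [show reasm (p :: q :: qs) = p ++ '"' :: reasm (q :: qs) from rfl,
            specOut_append p _ hqp (Or.inr ⟨_, rfl⟩)]
        rw [specOut_cons]
        simp only [if_pos trivial]
        rw [ihh.2]
        simp [gPieces, chain3_eq_simul]
      · rw [show reasm (p :: q :: qs) = p ++ '"' :: reasm (q :: qs) from rfl,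
            specIn_append p _ hqp false]
        rw [specIn_cons]
        cases hesc : escAfter false p with
        | true =>
          simp only [if_pos rfl]
          rw [ihh.2]
          simp [gPieces, hesc]
        | false =>
          simp only [Bool.false_eq_true, if_neg (by simp : ¬False),
            if_neg (by decide : ¬('"' : Char) = '\\'), if_pos trivial]
          rw [ihh.1]
          simp [gPieces, hesc]
theorem pyBpiece_eq_chain3 (p : List Char) : pyBpiece p = chain3 p := by
  rw [pyBpiece, repl2_eq_replace, repl2_eq_replace, repl2_eq_replace, chain3]

theorem rstrip_append_bs (p : List Char) : pyBrstrip (p ++ ['\\']) = pyBrstrip p := by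
  simp [pyBrstrip]

theorem rstrip_append_ne (p : List Char) (c : Char) (hc : ¬c = '\\') :
    pyBrstrip (p ++ [c]) = p ++ [c] := by
  simp [pyBrstrip, List.dropWhile, hc]

theorem rstrip_len_le (p : List Char) : (pyBrstrip p).length ≤ p.length := by
  simp only [pyBrstrip, List.length_reverse]
  calc (p.reverse.dropWhile (· == '\\')).length ≤ p.reverse.length := List.length_dropWhile_le _ _
    _ = p.length := by simp

theorem parity_eq_escAfter (p : List Char) :
    ((p.length - (pyBrstrip p).length) % 2 == 0) = !escAfter false p := by
  induction p using List.reverseRecOn with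
  | nil => simp [pyBrstrip, escAfter]
  | append_singleton p c ih =>
    have hfold : escAfter false (p ++ [c]) = escStep (escAfter false p) c := by
      simp [escAfter, List.foldl_append]
    by_cases hc : c = '\\'
    · subst hc
      rw [hfold, rstrip_append_bs]
      have hle := rstrip_len_le p
      cases hE : escAfter false p with
      | true =>
        rw [hE] at ih
        simp only [Bool.not_true] at ih
        have hd : (p.length - (pyBrstrip p).length) % 2 ≠ 0 := by
          intro h; simp [h] at ih
        simp only [hE, escStep, List.length_append, List.length_cons, List.length_nil,
          if_pos trivial, Bool.not_false, beq_iff_eq]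
        omega
      | false =>
        rw [hE] at ih
        simp only [Bool.not_false, beq_iff_eq] at ih
        simp only [hE, escStep, List.length_append, List.length_cons, List.length_nil,
          Bool.false_eq_true, if_neg (by simp : ¬False), decide_true, Bool.not_true,
          beq_eq_false_iff_ne, ne_eq]
        omega
    · rw [hfold, rstrip_append_ne p c hc]
      simp [escStep, hc]

theorem pyBloop_succ (ps : List (List Char)) (ins : Bool) (out : List Char) (k : Nat) :
    pyBloop ps (k + 1) ins out = out ++ qList ps ins := by
  induction ps generalizing ins out k with
  | nil => simp [pyBloop, qList]
  | cons piece ps ih =>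
    have hk : (k + 1 ≠ 0) = True := by simp
    cases ins with
    | true =>
      rw [pyBloop]
      simp only [if_pos rfl, hk, if_true, parity_eq_escAfter]
      cases hesc : escAfter false piece with
      | false =>
        simp only [Bool.not_false, if_pos trivial]
        rw [ih]
        simp [qList, hesc, List.append_assoc]
      | true =>
        simp only [Bool.not_true, Bool.false_eq_true, if_neg (by simp : ¬False)]
        rw [ih]
        simp [qList, hesc, List.append_assoc]
    | false =>
      rw [pyBloop]
      simp only [Bool.false_eq_true, if_neg (by simp : ¬False), hk, if_true]
      rw [ih]
      simp [qList, pyBpiece_eq_chain3, List.append_assoc]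

theorem qList_eq_gPieces (ps : List (List Char)) (ins : Bool) :
    qList ps ins = match ps with | [] => [] | _ :: _ => '"' :: gPieces ps ins := by
  induction ps generalizing ins with
  | nil => simp [qList]
  | cons p ps ih =>
    cases ins with
    | true =>
      rw [qList, ih (escAfter false p)]
      cases ps <;> simp [gPieces]
    | false =>
      rw [qList, ih true]
      cases ps <;> simp [gPieces]
theorem unescape_list_eq (cs : List Char) :
    pyAgo cs false false [] = pyBloop (PySem.Chars.splitOn cs ['"']) 0 false [] := by
  rw [pyAgo_eq_spec, splitOn_eq_mySplit]
  simp only [Bool.false_eq_true, if_neg (by simp : ¬False), List.nil_append]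
  cases hsp : mySplit cs [] with
  | nil => exact absurd hsp (mySplit_ne_nil cs [])
  | cons p ps =>
    rw [pyBloop]
    simp only [Bool.false_eq_true, if_neg (by simp : ¬False), ne_eq,
      not_true_eq_false, if_neg (by simp : ¬¬(0 = 0)), List.nil_append]
    rw [pyBloop_succ ps true (pyBpiece p) 0]
    have hre := reasm_mySplit cs []
    rw [hsp] at hre
    simp only [List.reverse_nil, List.nil_append] at hre
    have hnq := mySplit_noquote cs [] (by simp)
    rw [hsp] at hnq
    have hsr := spec_reasm (p :: ps) (List.cons_ne_nil p ps) hnq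
    rw [← hre, hsr.1, pyBpiece_eq_chain3, qList_eq_gPieces]
    cases ps <;> simp [gPieces]

-- ===== VERDICT (by name: the statement is the Claim_ definition above) =====
theorem unescape_control_chars_outside_strings_py_spec : Claim_equal_unescape_control_chars_outside_strings_py := by
  intro text _
  show unescape_control_chars_outside_strings_py text = unescape_control_chars_outside_strings_py_alt text
  unfold unescape_control_chars_outside_strings_py unescape_control_chars_outside_strings_py_alt
  exact congrArg String.ofList (unescape_list_eq text.toList)
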